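-- pv_equiv track=rewrite | github.com/Yawn-Sean/Daily_CF_Problems | daily_problems/2025/07/0716/personal_submission/cf223a_liryc.py | solve
-- ===== SOURCE A (Python) =====
-- def solve(s: str) -> tuple[int, str]:
--     max_n, max_l, max_r, n = 0, 0, 0, 0
--     match = { ')': '(', ']': '[' }
--     stk = []
--     for i, c in enumerate(s):
--         if c == '(' or c == '[':
--             stk.append(~i)
--         elif stk and (len(stk) > 1 or stk[-1] < 0):
--             j = stk.pop()
--             if j >= 0:
--                 n, j = j, ~stk.pop()
--             else:
--                 n, j = 0, ~j
--             if s[j] == match[c]: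
--                 n += 1 if c == ']' else 0
--                 while stk and stk[-1] >= 0:
--                     n += stk.pop()
--                 if n > max_n:
--                     max_n, max_l, max_r = n, ~stk[-1] + 1 if stk else 0, i
--                 stk.append(n)
--             else:
--                 stk = [~i]
--         else:
--             stk = [~i]
--     return max_n, s[max_l:max_r + 1] if max_n else ''
-- ===== SOURCE B (Python) =====
-- def solve(s: str) -> tuple[int, str]:
--     n = len(s)
--     start = [-1] * n          # start[i] = start of the maximal matched segment ending at i, else -1
--     pref = [0] * (n + 1)      # pref[k] = number of ']' among s[:k]
--     best, bl, br = 0, 0, 0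
--     for i, c in enumerate(s):
--         pref[i + 1] = pref[i] + (1 if c == ']' else 0)
--         if c == ')' or c == ']':
--             k = start[i - 1] - 1 if i >= 1 and start[i - 1] >= 0 else i - 1
--             if k >= 0 and s[k] == ('(' if c == ')' else '['):
--                 st = start[k - 1] if k >= 1 and start[k - 1] >= 0 else k
--                 start[i] = st
--                 v = pref[i + 1] - pref[st]
--                 if v > best:
--                     best, bl, br = v, st, i
--     return (best, s[bl:br + 1]) if best else (0, '')
-- ===== Notes on version B (the rewrite author's own statement) =====
-- stated objective: alternative
-- what changed: Replaces A's single stack of one's-complement barrier indices with interleaved pair counts (and its pop/merge while-loop) by a two-array dynamic program: a segment-start array filled via the classic longest-valid-parentheses recurrence plus a prefix array counting closing square brackets, scanned once with no stack.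
import Mathlib
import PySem

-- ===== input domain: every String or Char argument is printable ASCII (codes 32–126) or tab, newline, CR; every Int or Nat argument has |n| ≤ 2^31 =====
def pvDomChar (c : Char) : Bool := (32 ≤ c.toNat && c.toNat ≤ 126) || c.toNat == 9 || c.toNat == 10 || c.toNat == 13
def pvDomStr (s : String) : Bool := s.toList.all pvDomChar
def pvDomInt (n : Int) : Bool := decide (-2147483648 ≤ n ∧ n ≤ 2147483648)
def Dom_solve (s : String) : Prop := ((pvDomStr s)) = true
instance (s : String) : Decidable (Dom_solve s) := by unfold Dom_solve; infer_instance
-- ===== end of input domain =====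

-- B replaces A's single stack of one's-complement barriers and interleaved pair counts by a
-- two-array dynamic program (segment-start array + prefix counts of closing square brackets);
-- same O(n) cost.

-- ===== PORT A =====
-- Python's ~i
def pvNot (i : Int) : Int := -1 - i

-- A's inner `while stk and stk[-1] >= 0: n += stk.pop()` loop
def solveMerge : Int → List Int → Int × List Int
  | n, [] => (n, [])
  | n, h :: t => if h ≥ 0 then solveMerge (n + h) t else (n, h :: t)

-- one iteration of A's for-loop; stack top = list head (Python appends/pops at the end).
-- `match[c]` is ported as `if c = ')' then '(' else '['`: exact for the only keys ')' and ']';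
-- for any other char Python raises KeyError there, which Pre_solve excludes.
def solveStep (cs : List Char) (acc : Int × Int × Int × List Int) (ic : Int × Char) :
    Int × Int × Int × List Int :=
  match acc, ic with
  | (max_n, max_l, max_r, stk), (i, c) =>
    if c = '(' ∨ c = '[' then (max_n, max_l, max_r, pvNot i :: stk)
    else
      match stk with
      | [] => (max_n, max_l, max_r, [pvNot i])
      | j0 :: stk1 =>
        if stk1 ≠ [] ∨ j0 < 0 then
          match (if j0 ≥ 0 then (j0, pvNot (stk1.headD 0), stk1.tail) else ((0 : Int), pvNot j0, stk1)) with
          | (n, j, stk2) =>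
            if PySem.List.pyGet? cs j = some (if c = ')' then '(' else '[') then
              let n1 := n + (if c = ']' then (1 : Int) else 0)
              match solveMerge n1 stk2 with
              | (n2, stk3) =>
                if n2 > max_n then
                  (n2, (if stk3 ≠ [] then pvNot (stk3.headD 0) + 1 else 0), i, n2 :: stk3)
                else (max_n, max_l, max_r, n2 :: stk3)
            else (max_n, max_l, max_r, [pvNot i])
        else (max_n, max_l, max_r, [pvNot i])

def solve (s : String) : Int × String :=
  let cs := s.toList
  match (PySem.List.enumerate cs 0).foldl (solveStep cs) (0, 0, 0, []) with
  | (max_n, max_l, max_r, _) =>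
    (max_n, if max_n ≠ 0 then String.mk (PySem.List.slice cs (some max_l) (some (max_r + 1))) else "")

-- ===== PORT B =====
-- one iteration of B's for-loop over (i, c); state = (start array, pref array, best, bl, br)
def solveAltStep (cs : List Char) (acc : List Int × List Int × Int × Int × Int) (ic : Int × Char) :
    List Int × List Int × Int × Int × Int :=
  match acc, ic with
  | (start, pref, best, bl, br), (i, c) =>
    let pref1 := PySem.List.pySetD pref (i + 1) (PySem.List.pyGetD pref i 0 + (if c = ']' then (1 : Int) else 0))
    if c = ')' ∨ c = ']' then
      let k := if 1 ≤ i ∧ 0 ≤ PySem.List.pyGetD start (i - 1) 0 then PySem.List.pyGetD start (i - 1) 0 - 1 else i - 1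
      if 0 ≤ k ∧ PySem.List.pyGet? cs k = some (if c = ')' then '(' else '[') then
        let st := if 1 ≤ k ∧ 0 ≤ PySem.List.pyGetD start (k - 1) 0 then PySem.List.pyGetD start (k - 1) 0 else k
        let start1 := PySem.List.pySetD start i st
        let v := PySem.List.pyGetD pref1 (i + 1) 0 - PySem.List.pyGetD pref1 st 0
        if v > best then (start1, pref1, v, st, i) else (start1, pref1, best, bl, br)
      else (start, pref1, best, bl, br)
    else (start, pref1, best, bl, br)

def solve_alt (s : String) : Int × String :=
  let cs := s.toList
  let n := cs.length
  match (PySem.List.enumerate cs 0).foldl (solveAltStep cs)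
      (List.replicate n (-1 : Int), List.replicate (n + 1) (0 : Int), 0, 0, 0) with
  | (_, _, best, bl, br) =>
    if best ≠ 0 then (best, String.mk (PySem.List.slice cs (some bl) (some (br + 1)))) else ((0 : Int), "")

-- ===== PRECONDITION & SPEC =====
-- cstate cs i: the unmatched-opener positions of the prefix cs[:i] (top first), or none once the
-- prefix stopped being a fully-matchable bracket sequence (an unmatched/mismatched closer or a
-- non-bracket character occurred).
def cstep (cs : List Char) (i : Nat) (st : List Nat) : Option (List Nat) :=
  if cs.getD i ' ' = '(' ∨ cs.getD i ' ' = '[' then some (i :: st)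
  else if cs.getD i ' ' = ')' ∨ cs.getD i ' ' = ']' then
    match st with
    | p :: t => if cs.getD p ' ' = (if cs.getD i ' ' = ')' then '(' else '[') then some t else none
    | [] => none
  else none

def cstate (cs : List Char) : Nat → Option (List Nat)
  | 0 => some []
  | i+1 => (cstate cs i).bind (cstep cs i)

-- Pre_solve admits exactly the inputs on which A returns: A raises KeyError (`match[c]`) at a
-- non-bracket character unless the prefix before it is a fully-matched bracket sequence, so every
-- non-bracket character must occur at a position whose prefix is fully matched (cstate = some []).
def Pre_solve (s : String) : Prop :=
  ((List.range s.toList.length).all fun i =>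
    (let c := s.toList.getD i ' '
     c == '(' || c == ')' || c == '[' || c == ']') || cstate s.toList i == some []) = true
instance (s : String) : Decidable (Pre_solve s) := by unfold Pre_solve; infer_instance

def pvWitness_solve : String := "([])[]"

def Spec_solve (s : String) (out : Int × String) : Prop := out = solve_alt s
instance (s : String) (out : Int × String) : Decidable (Spec_solve s out) := by unfold Spec_solve; infer_instance

-- ===== CLAIM (what is proved, stated in full; the proofs are below) =====
def Claim_equal_solve : Prop := ∀ (s : String), Dom_solve s → Pre_solve s → Spec_solve s (solve s)

-- ===== LEMMAS AND PROOFS =====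

-- number of ']' among the first k characters (an Int, matching B's pref array)
def cntP (cs : List Char) (k : Nat) : Int := ((cs.take k).count ']' : Nat)  -- closing-square-bracket count of the first k chars

-- spec of B's start array: start of the maximal matched segment ending at i (else -1), with fuel
def sS (cs : List Char) : Nat → Nat → Int
  | 0, _ => -1
  | fuel+1, i =>
    let c := cs.getD i ' '
    if c = ')' ∨ c = ']' then
      let k : Int := if 1 ≤ i ∧ 0 ≤ sS cs fuel (i-1) then sS cs fuel (i-1) - 1 else (i : Int) - 1
      if 0 ≤ k ∧ cs.getD k.toNat ' ' = (if c = ')' then '(' else '[') then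
        if 1 ≤ k ∧ 0 ≤ sS cs fuel ((k-1).toNat) then sS cs fuel ((k-1).toNat) else k
      else -1
    else -1

def S (cs : List Char) (i : Nat) : Int := sS cs (i+1) i

-- A's stack contents after i characters, expressed from the segment-start spec, with fuel
def eS (cs : List Char) : Nat → Nat → List Int
  | 0, _ => []
  | _+1, 0 => []
  | fuel+1, m+1 =>
    if 0 ≤ S cs m then
      (cntP cs (m+1) - cntP cs (S cs m).toNat) :: eS cs fuel (S cs m).toNat
    else if cs.getD m ' ' = '(' ∨ cs.getD m ' ' = '[' then
      pvNot (m : Int) :: eS cs fuel m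
    else [pvNot (m : Int)]

def E (cs : List Char) (i : Nat) : List Int := eS cs i i

-- the best-(value, left, right) triple after i characters
def bestStep (cs : List Char) (t : Int × Int × Int) (j : Nat) : Int × Int × Int :=
  if 0 ≤ S cs j then
    let v := cntP cs (j+1) - cntP cs (S cs j).toNat
    if v > t.1 then (v, S cs j, (j : Int)) else t
  else t

def bestT (cs : List Char) (i : Nat) : Int × Int × Int := (List.range i).foldl (bestStep cs) (0, 0, 0)

-- B's two arrays after i characters
def startL (cs : List Char) (i : Nat) : List Int :=
  (List.range cs.length).map (fun j => if j < i then S cs j else -1)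
def prefL (cs : List Char) (i : Nat) : List Int :=
  (List.range (cs.length + 1)).map (fun j => if j ≤ i then cntP cs j else 0)

-- combined loop states
def stA (cs : List Char) (i : Nat) : Int × Int × Int × List Int :=
  ((bestT cs i).1, (bestT cs i).2.1, (bestT cs i).2.2, E cs i)
def stB (cs : List Char) (i : Nat) : List Int × List Int × Int × Int × Int :=
  (startL cs i, prefL cs i, (bestT cs i).1, (bestT cs i).2.1, (bestT cs i).2.2)

lemma sS_le (cs : List Char) : ∀ fuel i, sS cs fuel i ≤ (i : Int) - 1 := by
  intro fuel
  induction fuel with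
  | zero => intro i; simp [sS]; omega
  | succ g ih =>
    intro i
    show (let c := cs.getD i ' '; if c = ')' ∨ c = ']' then
       let k : Int := if 1 ≤ i ∧ 0 ≤ sS cs g (i-1) then sS cs g (i-1) - 1 else (i : Int) - 1
       if 0 ≤ k ∧ cs.getD k.toNat ' ' = (if c = ')' then '(' else '[') then
         if 1 ≤ k ∧ 0 ≤ sS cs g ((k-1).toNat) then sS cs g ((k-1).toNat) else k
       else -1
     else -1) ≤ (i : Int) - 1
    by_cases hc : cs.getD i ' ' = ')' ∨ cs.getD i ' ' = ']'
    · simp only [if_pos hc]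
      set k : Int := if 1 ≤ i ∧ 0 ≤ sS cs g (i-1) then sS cs g (i-1) - 1 else (i : Int) - 1 with hk
      have hk1 : k ≤ (i : Int) - 1 := by
        rw [hk]; split
        · have := ih (i-1)
          rename_i hcase
          have : (((i:Nat) - 1 : Nat) : Int) ≤ (i : Int) - 1 := by omega
          have h2 := ih (i-1)
          omega
        · omega
      by_cases h0 : 0 ≤ k ∧ cs.getD k.toNat ' ' = (if cs.getD i ' ' = ')' then '(' else '[')
      · simp only [if_pos h0]
        split
        · rename_i hin
          have h3 := ih ((k-1).toNat)
          have : (((k-1).toNat : Nat) : Int) = k - 1 := by omega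
          omega
        · exact hk1
      · simp only [if_neg h0]; omega
    · simp only [if_neg hc]; omega

lemma sS_stable (cs : List Char) : ∀ i f1 f2, i < f1 → i < f2 → sS cs f1 i = sS cs f2 i := by
  intro i
  induction i using Nat.strong_induction_on with
  | _ i IH =>
    intro f1 f2 h1 h2
    obtain ⟨g1, rfl⟩ : ∃ g, f1 = g + 1 := ⟨f1 - 1, by omega⟩
    obtain ⟨g2, rfl⟩ : ∃ g, f2 = g + 1 := ⟨f2 - 1, by omega⟩
    show (let c := cs.getD i ' '; if c = ')' ∨ c = ']' then
       let k : Int := if 1 ≤ i ∧ 0 ≤ sS cs g1 (i-1) then sS cs g1 (i-1) - 1 else (i : Int) - 1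
       if 0 ≤ k ∧ cs.getD k.toNat ' ' = (if c = ')' then '(' else '[') then
         if 1 ≤ k ∧ 0 ≤ sS cs g1 ((k-1).toNat) then sS cs g1 ((k-1).toNat) else k
       else -1
     else -1) =
     (let c := cs.getD i ' '; if c = ')' ∨ c = ']' then
       let k : Int := if 1 ≤ i ∧ 0 ≤ sS cs g2 (i-1) then sS cs g2 (i-1) - 1 else (i : Int) - 1
       if 0 ≤ k ∧ cs.getD k.toNat ' ' = (if c = ')' then '(' else '[') then
         if 1 ≤ k ∧ 0 ≤ sS cs g2 ((k-1).toNat) then sS cs g2 ((k-1).toNat) else k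
       else -1
     else -1)
    by_cases hc : cs.getD i ' ' = ')' ∨ cs.getD i ' ' = ']'
    · simp only [if_pos hc]
      by_cases hi : 1 ≤ i
      · have hprev : sS cs g1 (i-1) = sS cs g2 (i-1) := IH (i-1) (by omega) g1 g2 (by omega) (by omega)
        rw [hprev]
        set k : Int := if 1 ≤ i ∧ 0 ≤ sS cs g2 (i-1) then sS cs g2 (i-1) - 1 else (i : Int) - 1 with hk
        have hkle : k ≤ (i : Int) - 1 := by
          rw [hk]; split
          · have := sS_le cs g2 (i-1); omega
          · omega
        by_cases h0 : 0 ≤ k ∧ cs.getD k.toNat ' ' = (if cs.getD i ' ' = ')' then '(' else '[')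
        · simp only [if_pos h0]
          by_cases hk1 : 1 ≤ k
          · have harg : (k-1).toNat < i := by omega
            have : sS cs g1 ((k-1).toNat) = sS cs g2 ((k-1).toNat) :=
              IH ((k-1).toNat) harg g1 g2 (by omega) (by omega)
            rw [this]
          · have c1 : ¬ (1 ≤ k ∧ 0 ≤ sS cs g1 ((k-1).toNat)) := fun h => hk1 h.1
            have c2 : ¬ (1 ≤ k ∧ 0 ≤ sS cs g2 ((k-1).toNat)) := fun h => hk1 h.1
            rw [if_neg c1, if_neg c2]
        · simp only [if_neg h0]
      · have c1 : ¬ (1 ≤ i ∧ 0 ≤ sS cs g1 (i-1)) := fun h => hi h.1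
        have c2 : ¬ (1 ≤ i ∧ 0 ≤ sS cs g2 (i-1)) := fun h => hi h.1
        rw [if_neg c1, if_neg c2]
        have hneg : ¬ (0 ≤ (i:Int) - 1 ∧ cs.getD ((i:Int)-1).toNat ' ' = if cs.getD i ' ' = ')' then '(' else '[') :=
          fun h => absurd h.1 (by omega)
        rw [if_neg hneg, if_neg hneg]
    · simp only [if_neg hc]

lemma S_le (cs : List Char) (i : Nat) : S cs i ≤ (i : Int) - 1 := sS_le cs (i+1) i

lemma S_eq (cs : List Char) (i : Nat) : S cs i =
    (let c := cs.getD i ' '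
     if c = ')' ∨ c = ']' then
       let k : Int := if 1 ≤ i ∧ 0 ≤ S cs (i-1) then S cs (i-1) - 1 else (i : Int) - 1
       if 0 ≤ k ∧ cs.getD k.toNat ' ' = (if c = ')' then '(' else '[') then
         if 1 ≤ k ∧ 0 ≤ S cs ((k-1).toNat) then S cs ((k-1).toNat) else k
       else -1
     else -1) := by
  show sS cs (i+1) i = _
  show (let c := cs.getD i ' '; if c = ')' ∨ c = ']' then
       let k : Int := if 1 ≤ i ∧ 0 ≤ sS cs i (i-1) then sS cs i (i-1) - 1 else (i : Int) - 1
       if 0 ≤ k ∧ cs.getD k.toNat ' ' = (if c = ')' then '(' else '[') then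
         if 1 ≤ k ∧ 0 ≤ sS cs i ((k-1).toNat) then sS cs i ((k-1).toNat) else k
       else -1
     else -1) = _
  by_cases hc : cs.getD i ' ' = ')' ∨ cs.getD i ' ' = ']'
  · simp only [if_pos hc]
    by_cases hi : 1 ≤ i
    · have hprev : sS cs i (i-1) = S cs (i-1) := sS_stable cs (i-1) i ((i-1)+1) (by omega) (by omega)
      rw [hprev]
      set k : Int := if 1 ≤ i ∧ 0 ≤ S cs (i-1) then S cs (i-1) - 1 else (i : Int) - 1 with hk
      have hkle : k ≤ (i : Int) - 1 := by
        rw [hk]; split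
        · have := S_le cs (i-1); simp only [S] at *; omega
        · omega
      by_cases hk1 : 1 ≤ k
      · have : sS cs i ((k-1).toNat) = S cs ((k-1).toNat) :=
          sS_stable cs ((k-1).toNat) i ((k-1).toNat+1) (by omega) (by omega)
        rw [this]
      · have c1 : ¬ (1 ≤ k ∧ 0 ≤ sS cs i ((k-1).toNat)) := fun h => hk1 h.1
        have c2 : ¬ (1 ≤ k ∧ 0 ≤ S cs ((k-1).toNat)) := fun h => hk1 h.1
        rw [if_neg c1, if_neg c2]
    · have c1 : ¬ (1 ≤ i ∧ 0 ≤ sS cs i (i-1)) := fun h => hi h.1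
      have c2 : ¬ (1 ≤ i ∧ 0 ≤ S cs (i-1)) := fun h => hi h.1
      rw [if_neg c1, if_neg c2]
      have hneg : ¬ (0 ≤ (i:Int) - 1 ∧ cs.getD ((i:Int)-1).toNat ' ' = if cs.getD i ' ' = ')' then '(' else '[') :=
        fun h => absurd h.1 (by omega)
      rw [if_neg hneg, if_neg hneg]
  · simp only [if_neg hc]

lemma S_neg_of_not_closer (cs : List Char) (i : Nat)
    (h : ¬ (cs.getD i ' ' = ')' ∨ cs.getD i ' ' = ']')) : S cs i = -1 := by
  rw [S_eq]; exact if_neg h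

lemma S_max (cs : List Char) : ∀ i, 0 ≤ S cs i →
    (S cs i).toNat = 0 ∨ S cs ((S cs i).toNat - 1) < 0 := by
  intro i
  induction i using Nat.strong_induction_on with
  | _ i IH =>
    intro hpos
    rw [S_eq cs i] at hpos ⊢
    by_cases hc : cs.getD i ' ' = ')' ∨ cs.getD i ' ' = ']'
    case neg => simp only [if_neg hc] at hpos; omega
    simp only [if_pos hc] at hpos ⊢
    set k : Int := if 1 ≤ i ∧ 0 ≤ S cs (i-1) then S cs (i-1) - 1 else (i : Int) - 1 with hk
    by_cases h0 : 0 ≤ k ∧ cs.getD k.toNat ' ' = (if cs.getD i ' ' = ')' then '(' else '[')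
    case neg => simp only [if_neg h0] at hpos; omega
    simp only [if_pos h0] at hpos ⊢
    have hkle : k ≤ (i : Int) - 1 := by
      rw [hk]; split
      · have := S_le cs (i-1); omega
      · omega
    by_cases h1 : 1 ≤ k ∧ 0 ≤ S cs ((k-1).toNat)
    · simp only [if_pos h1]
      exact IH ((k-1).toNat) (by omega) h1.2
    · simp only [if_neg h1]
      by_cases hk1 : 1 ≤ k
      · right
        have hlt : ¬ 0 ≤ S cs ((k-1).toNat) := fun h => h1 ⟨hk1, h⟩
        have he : k.toNat - 1 = (k-1).toNat := by omega
        rw [he]; omega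
      · left; omega

-- the unmatched-opener chain of a clean prefix, related to the segment-start spec S
lemma cstate_facts (cs : List Char) : ∀ i ps, cstate cs i = some ps →
    (match ps with
     | [] => i = 0 ∨ (1 ≤ i ∧ S cs (i-1) = 0)
     | p :: t => p < i ∧ (cs.getD p ' ' = '(' ∨ cs.getD p ' ' = '[')
         ∧ (i = p + 1 ∨ S cs (i-1) = ((p+1 : Nat) : Int))
         ∧ cstate cs p = some t) := by
  intro i
  induction i using Nat.strong_induction_on with
  | _ i IH =>
    intro ps h
    match i, h with
    | 0, h =>
      have hps : ps = [] := by
        have : (some [] : Option (List Nat)) = some ps := h.symm ▸ rfl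
        injection (show (some ([] : List Nat)) = some ps from by rw [← h]; rfl) with h2
        exact h2.symm
      subst hps
      exact Or.inl rfl
    | (m+1), h =>
      rw [cstate] at h
      cases hst : cstate cs m with
      | none => rw [hst] at h; exact absurd h (by simp)
      | some st =>
        rw [hst] at h
        rw [Option.bind_some] at h
        unfold cstep at h
        by_cases hop : cs.getD m ' ' = '(' ∨ cs.getD m ' ' = '['
        · rw [if_pos hop] at h
          have hps : ps = m :: st := by injection h with h2; exact h2.symm
          subst hps
          exact ⟨by omega, hop, Or.inl rfl, hst⟩
        · rw [if_neg hop] at h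
          by_cases hclr : cs.getD m ' ' = ')' ∨ cs.getD m ' ' = ']'
          · rw [if_pos hclr] at h
            cases st with
            | nil => exact absurd h (by simp)
            | cons p t =>
              replace h : (if cs.getD p ' ' = (if cs.getD m ' ' = ')' then '(' else '[')
                  then some t else none) = some ps := h
              by_cases hmt : cs.getD p ' ' = (if cs.getD m ' ' = ')' then '(' else '[')
              · rw [if_pos hmt] at h
                have hps : t = ps := by injection h
                subst hps
                obtain ⟨hplt, hpop, hseg, hcp⟩ := IH m (by omega) (p :: t) hst
                have hm : m < cs.length := by
                  by_contra hcon
                  rw [List.getD_eq_default _ _ (by omega)] at hclr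
                  rcases hclr with h1 | h1 <;> exact absurd h1 (by decide)
                have hSp : S cs p = -1 := S_neg_of_not_closer cs p
                  (by rcases hpop with h1 | h1 <;> rw [h1] <;> decide)
                have hSm := S_eq cs m
                simp only [if_pos hclr] at hSm
                have hk : (if 1 ≤ m ∧ 0 ≤ S cs (m-1) then S cs (m-1) - 1 else (m : Int) - 1)
                    = ((p : Nat) : Int) := by
                  rcases hseg with he | hs
                  · have : m = p + 1 := by omega
                    subst this
                    rw [if_neg (by intro hcon; rw [show p+1-1 = p from rfl, hSp] at hcon; omega)]
                    push_cast; ring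
                  · rw [if_pos ⟨by omega, by rw [hs]; omega⟩, hs]; push_cast; ring
                rw [hk] at hSm
                rw [if_pos ⟨by omega, by rw [show (((p:Nat):Int)).toNat = p by omega]; exact hmt⟩] at hSm
                have hcast : ((((p:Nat):Int)) - 1).toNat = p - 1 := by omega
                rw [hcast] at hSm
                cases t with
                | nil =>
                  refine Or.inr ⟨by omega, ?_⟩
                  rcases IH p (by omega) [] hcp with hp0 | ⟨hp1, hSp1⟩
                  · subst hp0
                    rw [if_neg (by intro hcon; exact absurd hcon.1 (by norm_num))] at hSm
                    simpa using hSm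
                  · rw [if_pos ⟨by omega, by rw [hSp1]⟩, hSp1] at hSm
                    simpa using hSm
                | cons p2 t2 =>
                  obtain ⟨hp2lt, hp2op, hseg2, hcp2⟩ := IH p (by omega) (p2 :: t2) hcp
                  have hSmval : S cs m = ((p2+1 : Nat) : Int) := by
                    rcases hseg2 with he2 | hs2
                    · have : p = p2 + 1 := by omega
                      subst this
                      have hSp2 : S cs p2 = -1 := S_neg_of_not_closer cs p2
                        (by rcases hp2op with h1 | h1 <;> rw [h1] <;> decide)
                      rw [if_neg (by
                        intro hcon
                        rw [show p2+1-1 = p2 from rfl, hSp2] at hcon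
                        omega)] at hSm
                      exact hSm
                    · rw [if_pos ⟨by omega, by rw [hs2]; omega⟩, hs2] at hSm
                      exact hSm
                  exact ⟨by omega, hp2op, Or.inr hSmval, hcp2⟩
              · rw [if_neg hmt] at h
                exact absurd h (by simp)
          · rw [if_neg hclr] at h
            exact absurd h (by simp)

lemma cntP_mono (cs : List Char) {a b : Nat} (h : a ≤ b) : cntP cs a ≤ cntP cs b := by
  unfold cntP
  have hsub : List.Sublist (cs.take a) (cs.take b) := by
    have : cs.take a = (cs.take b).take a := by rw [List.take_take, Nat.min_eq_left h]
    rw [this]; exact List.take_sublist _ _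
  exact_mod_cast hsub.count_le ']'

lemma cntP_succ (cs : List Char) (i : Nat) (h : i < cs.length) :
    cntP cs (i+1) = cntP cs i + (if cs[i] = ']' then 1 else 0) := by
  unfold cntP
  rw [List.take_succ, List.getElem?_eq_getElem h]
  simp only [Option.toList_some, List.count_append, List.count_singleton]
  by_cases hx : cs[i] = ']' <;> simp [hx]

lemma eS_stable (cs : List Char) : ∀ i f1 f2, i ≤ f1 → i ≤ f2 → eS cs f1 i = eS cs f2 i := by
  intro i
  induction i using Nat.strong_induction_on with
  | _ i IH =>
    intro f1 f2 h1 h2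
    match i, h1, h2 with
    | 0, h1, h2 =>
      cases f1 <;> cases f2 <;> rfl
    | (m+1), h1, h2 =>
      obtain ⟨g1, rfl⟩ : ∃ g, f1 = g + 1 := ⟨f1 - 1, by omega⟩
      obtain ⟨g2, rfl⟩ : ∃ g, f2 = g + 1 := ⟨f2 - 1, by omega⟩
      show (if 0 ≤ S cs m then (cntP cs (m+1) - cntP cs (S cs m).toNat) :: eS cs g1 (S cs m).toNat
        else if cs.getD m ' ' = '(' ∨ cs.getD m ' ' = '[' then pvNot (m : Int) :: eS cs g1 m
        else [pvNot (m : Int)]) =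
        (if 0 ≤ S cs m then (cntP cs (m+1) - cntP cs (S cs m).toNat) :: eS cs g2 (S cs m).toNat
        else if cs.getD m ' ' = '(' ∨ cs.getD m ' ' = '[' then pvNot (m : Int) :: eS cs g2 m
        else [pvNot (m : Int)])
      by_cases hm : 0 ≤ S cs m
      · simp only [if_pos hm]
        have hle := S_le cs m
        rw [IH ((S cs m).toNat) (by omega) g1 g2 (by omega) (by omega)]
      · simp only [if_neg hm]
        by_cases ho : cs.getD m ' ' = '(' ∨ cs.getD m ' ' = '['
        · simp only [if_pos ho]
          rw [IH m (by omega) g1 g2 (by omega) (by omega)]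
        · simp only [if_neg ho]

lemma E_succ_pos (cs : List Char) (m : Nat) (h : 0 ≤ S cs m) :
    E cs (m+1) = (cntP cs (m+1) - cntP cs (S cs m).toNat) :: E cs (S cs m).toNat := by
  show (if 0 ≤ S cs m then (cntP cs (m+1) - cntP cs (S cs m).toNat) :: eS cs m (S cs m).toNat
    else if cs.getD m ' ' = '(' ∨ cs.getD m ' ' = '[' then pvNot (m : Int) :: eS cs m m
    else [pvNot (m : Int)]) = _
  rw [if_pos h]
  have hle := S_le cs m
  congr 1
  exact eS_stable cs ((S cs m).toNat) m ((S cs m).toNat) (by omega) (le_refl _)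

lemma E_succ_neg_opener (cs : List Char) (m : Nat) (h : S cs m < 0)
    (ho : cs.getD m ' ' = '(' ∨ cs.getD m ' ' = '[') :
    E cs (m+1) = pvNot (m : Int) :: E cs m := by
  show (if 0 ≤ S cs m then (cntP cs (m+1) - cntP cs (S cs m).toNat) :: eS cs m (S cs m).toNat
    else if cs.getD m ' ' = '(' ∨ cs.getD m ' ' = '[' then pvNot (m : Int) :: eS cs m m
    else [pvNot (m : Int)]) = _
  rw [if_neg (by omega), if_pos ho]; rfl

lemma E_succ_neg_closer (cs : List Char) (m : Nat) (h : S cs m < 0)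
    (ho : ¬ (cs.getD m ' ' = '(' ∨ cs.getD m ' ' = '[')) :
    E cs (m+1) = [pvNot (m : Int)] := by
  show (if 0 ≤ S cs m then (cntP cs (m+1) - cntP cs (S cs m).toNat) :: eS cs m (S cs m).toNat
    else if cs.getD m ' ' = '(' ∨ cs.getD m ' ' = '[' then pvNot (m : Int) :: eS cs m m
    else [pvNot (m : Int)]) = _
  rw [if_neg (by omega), if_neg ho]

lemma merge_stop (cs : List Char) (q : Nat) (h : q = 0 ∨ S cs (q-1) < 0) (y : Int) :
    solveMerge y (E cs q) = (y, E cs q) := by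
  rcases Nat.eq_zero_or_pos q with h0 | hposq
  · subst h0; rfl
  · obtain ⟨m, rfl⟩ : ∃ m, q = m + 1 := ⟨q - 1, by omega⟩
    have hneg : S cs m < 0 := by
      rcases h with h | h
      · omega
      · simpa using h
    have hpv : ¬ (pvNot (m : Int) ≥ 0) := by unfold pvNot; omega
    by_cases ho : cs.getD m ' ' = '(' ∨ cs.getD m ' ' = '['
    · rw [E_succ_neg_opener cs m hneg ho]
      show (if pvNot (m : Int) ≥ 0 then _ else (y, pvNot (m : Int) :: E cs m)) = _
      rw [if_neg hpv]
    · rw [E_succ_neg_closer cs m hneg ho]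
      show (if pvNot (m : Int) ≥ 0 then _ else (y, [pvNot (m : Int)])) = _
      rw [if_neg hpv]

lemma merge_E (cs : List Char) (p : Nat) (x : Int) :
    solveMerge x (E cs p) =
      (x + (cntP cs p - cntP cs (if 1 ≤ p ∧ 0 ≤ S cs (p-1) then (S cs (p-1)).toNat else p)),
       E cs (if 1 ≤ p ∧ 0 ≤ S cs (p-1) then (S cs (p-1)).toNat else p)) ∧
    ((if 1 ≤ p ∧ 0 ≤ S cs (p-1) then (S cs (p-1)).toNat else p) = 0 ∨
      S cs ((if 1 ≤ p ∧ 0 ≤ S cs (p-1) then (S cs (p-1)).toNat else p) - 1) < 0) ∧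
    (if 1 ≤ p ∧ 0 ≤ S cs (p-1) then (S cs (p-1)).toNat else p) ≤ p := by
  by_cases hp : 1 ≤ p ∧ 0 ≤ S cs (p-1)
  · obtain ⟨m, rfl⟩ : ∃ m, p = m + 1 := ⟨p - 1, by omega⟩
    simp only [if_pos hp]
    have hm : 0 ≤ S cs m := by simpa using hp.2
    have hle := S_le cs m
    have hq : (S cs m).toNat = (S cs ((m+1)-1)).toNat := by norm_num
    rw [E_succ_pos cs m hm]
    have hcnt : (cntP cs (m+1) - cntP cs (S cs m).toNat) ≥ 0 := by
      have := cntP_mono cs (show (S cs m).toNat ≤ m+1 by omega); omega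
    have hmax := S_max cs m hm
    have hstep : solveMerge x ((cntP cs (m+1) - cntP cs (S cs m).toNat) :: E cs (S cs m).toNat)
        = solveMerge (x + (cntP cs (m+1) - cntP cs (S cs m).toNat)) (E cs (S cs m).toNat) := by
      show (if (cntP cs (m+1) - cntP cs (S cs m).toNat) ≥ 0 then
        solveMerge (x + (cntP cs (m+1) - cntP cs (S cs m).toNat)) (E cs (S cs m).toNat) else _) = _
      rw [if_pos hcnt]
    rw [hstep, merge_stop cs ((S cs m).toNat) hmax _]
    refine ⟨?_, ?_, ?_⟩
    · simp only [← hq]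
    · simpa only [← hq] using hmax
    · simp only [← hq]; omega
  · simp only [if_neg hp]
    have hstop : p = 0 ∨ S cs (p-1) < 0 := by
      rcases Nat.eq_zero_or_pos p with h0 | hposp
      · left; exact h0
      · right; by_contra hge; exact hp ⟨by omega, by omega⟩
    rw [merge_stop cs p hstop x]
    refine ⟨?_, hstop, le_refl _⟩
    simp

lemma pvNot_pvNot (x : Int) : pvNot (pvNot x) = x := by unfold pvNot; ring

lemma E_top (cs : List Char) (q : Nat) (h : q = 0 ∨ S cs (q-1) < 0) :
    (if E cs q ≠ [] then pvNot ((E cs q).headD 0) + 1 else 0) = (q : Int) := by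
  rcases Nat.eq_zero_or_pos q with h0 | hposq
  · subst h0; rfl
  · obtain ⟨m, rfl⟩ : ∃ m, q = m + 1 := ⟨q - 1, by omega⟩
    have hneg : S cs m < 0 := by
      rcases h with h | h
      · omega
      · simpa using h
    by_cases ho : cs.getD m ' ' = '(' ∨ cs.getD m ' ' = '['
    · rw [E_succ_neg_opener cs m hneg ho]
      rw [if_pos (List.cons_ne_nil _ _), List.headD_cons, pvNot_pvNot]
      push_cast; ring
    · rw [E_succ_neg_closer cs m hneg ho]
      rw [if_pos (List.cons_ne_nil _ _), List.headD_cons, pvNot_pvNot]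
      push_cast; ring

lemma bestT_succ (cs : List Char) (i : Nat) :
    bestT cs (i+1) = bestStep cs (bestT cs i) i := by
  unfold bestT; rw [List.range_succ, List.foldl_append]; rfl

lemma stA_reset (cs : List Char) (i : Nat) (hSneg : S cs i = -1)
    (hncl : ¬ (cs.getD i ' ' = '(' ∨ cs.getD i ' ' = '[')) :
    stA cs (i+1) = ((bestT cs i).1, (bestT cs i).2.1, (bestT cs i).2.2, [pvNot (i : Int)]) := by
  unfold stA
  rw [bestT_succ]
  unfold bestStep
  rw [if_neg (by omega), E_succ_neg_closer cs i (by omega) hncl]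

-- the continuation shared by all successful-match branches of A's closer case
lemma stepA_match (cs : List Char) (i : Nat) (hi : i < cs.length) (p : Nat) (q : Nat) (x : Int)
    (hp : p < i)
    (hx : x = cntP cs i - cntP cs (p+1))
    (hpne : cs[p]'(by omega) ≠ ']')
    (hq : q = if 1 ≤ p ∧ 0 ≤ S cs (p-1) then (S cs (p-1)).toNat else p)
    (hSq : S cs i = (q : Int)) :
    (match solveMerge (x + (if cs[i] = ']' then (1 : Int) else 0)) (E cs p) with
     | (n2, stk3) =>
       if n2 > (bestT cs i).1 then
         (n2, (if stk3 ≠ [] then pvNot (stk3.headD 0) + 1 else 0), (i : Int), n2 :: stk3)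
       else ((bestT cs i).1, (bestT cs i).2.1, (bestT cs i).2.2, n2 :: stk3))
    = stA cs (i+1) := by
  have hm3 := merge_E cs p (x + (if cs[i] = ']' then (1 : Int) else 0))
  rw [← hq] at hm3
  obtain ⟨hmerge, hqmax, hqle⟩ := hm3
  rw [hmerge]
  have hn2 : x + (if cs[i] = ']' then (1 : Int) else 0) + (cntP cs p - cntP cs q)
      = cntP cs (i+1) - cntP cs q := by
    have h1 := cntP_succ cs i hi
    have h2 := cntP_succ cs p (by omega)
    rw [if_neg hpne] at h2
    omega
  show (if x + (if cs[i] = ']' then (1 : Int) else 0) + (cntP cs p - cntP cs q) > (bestT cs i).1 then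
      (x + (if cs[i] = ']' then (1 : Int) else 0) + (cntP cs p - cntP cs q),
        (if E cs q ≠ [] then pvNot ((E cs q).headD 0) + 1 else 0), (i : Int),
        (x + (if cs[i] = ']' then (1 : Int) else 0) + (cntP cs p - cntP cs q)) :: E cs q)
    else ((bestT cs i).1, (bestT cs i).2.1, (bestT cs i).2.2,
        (x + (if cs[i] = ']' then (1 : Int) else 0) + (cntP cs p - cntP cs q)) :: E cs q))
    = stA cs (i+1)
  rw [hn2, E_top cs q hqmax]
  have hE1 : E cs (i+1) = (cntP cs (i+1) - cntP cs q) :: E cs q := by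
    rw [E_succ_pos cs i (by omega)]
    rw [hSq]
    norm_num
  have hb1 : bestT cs (i+1) = (if cntP cs (i+1) - cntP cs q > (bestT cs i).1 then
      (cntP cs (i+1) - cntP cs q, (q : Int), (i : Int)) else bestT cs i) := by
    rw [bestT_succ]
    unfold bestStep
    rw [if_pos (by omega), hSq]
    norm_num
  unfold stA
  rw [hb1, hE1]
  by_cases hgt : cntP cs (i+1) - cntP cs q > (bestT cs i).1
  · rw [if_pos hgt, if_pos hgt]
  · rw [if_neg hgt, if_neg hgt]

-- A's closer case, after the S-recurrence value k has been identified as the position p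
lemma stepA_closer (cs : List Char)
    (i : Nat) (hi : i < cs.length) (hcl : cs[i] = ')' ∨ cs[i] = ']') :
    solveStep cs (stA cs i) ((i : Int), cs[i]) = stA cs (i+1) := by
  have hgetc : cs.getD i ' ' = cs[i] := List.getD_eq_getElem cs ' ' hi
  have hopneg : ¬ (cs[i] = '(' ∨ cs[i] = '[') := by
    rcases hcl with h | h <;> rw [h] <;> decide
  have hncl : ¬ (cs.getD i ' ' = '(' ∨ cs.getD i ' ' = '[') := by rw [hgetc]; exact hopneg
  have hro_ne : (if cs[i] = ')' then '(' else '[') ≠ ']' := by split <;> decide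
  have hSi := S_eq cs i
  rw [hgetc] at hSi
  simp only [if_pos hcl] at hSi
  rcases Nat.eq_zero_or_pos i with hi0 | hipos
  · -- i = 0 : empty stack, A resets
    subst hi0
    have hk : ¬ (0 ≤ (if 1 ≤ (0:Nat) ∧ 0 ≤ S cs (0-1) then S cs (0-1) - 1 else ((0:Nat) : Int) - 1) ∧
        cs.getD (if 1 ≤ (0:Nat) ∧ 0 ≤ S cs (0-1) then S cs (0-1) - 1 else ((0:Nat) : Int) - 1).toNat ' '
          = (if cs[0] = ')' then '(' else '[')) := by
      rw [if_neg (fun h => absurd h.1 (by omega))]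
      intro h
      exact absurd h.1 (by omega)
    rw [if_neg hk] at hSi
    have hstA : stA cs 0 = ((bestT cs 0).1, (bestT cs 0).2.1, (bestT cs 0).2.2, ([] : List Int)) := rfl
    rw [hstA]
    show (if cs[0] = '(' ∨ cs[0] = '[' then
        ((bestT cs 0).1, (bestT cs 0).2.1, (bestT cs 0).2.2, pvNot ((0:Nat) : Int) :: ([] : List Int))
      else ((bestT cs 0).1, (bestT cs 0).2.1, (bestT cs 0).2.2, [pvNot ((0:Nat) : Int)])) = stA cs 1
    rw [if_neg hopneg]
    exact (stA_reset cs 0 hSi hncl).symm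
  · by_cases hs1 : 0 ≤ S cs (i-1)
    · -- top of A's stack is a pair count
      obtain ⟨stn, hstn⟩ : ∃ v : Nat, (S cs (i-1)).toNat = v := ⟨_, rfl⟩
      have hSst : S cs (i-1) = (stn : Int) := by omega
      have hstle : stn < i := by have := S_le cs (i-1); omega
      have hE : E cs i = (cntP cs i - cntP cs stn) :: E cs stn := by
        have e1 : (i-1)+1 = i := by omega
        calc E cs i = E cs ((i-1)+1) := by rw [e1]
        _ = (cntP cs ((i-1)+1) - cntP cs (S cs (i-1)).toNat) :: E cs (S cs (i-1)).toNat :=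
            E_succ_pos cs (i-1) hs1
        _ = (cntP cs i - cntP cs stn) :: E cs stn := by rw [e1, hstn]
      have hcnt0 : 0 ≤ cntP cs i - cntP cs stn := by
        have := cntP_mono cs (show stn ≤ i by omega); omega
      rcases Nat.eq_zero_or_pos stn with h0 | hposst
      · -- count with nothing below: A resets
        subst h0
        have hk : (if 1 ≤ i ∧ 0 ≤ S cs (i-1) then S cs (i-1) - 1 else (i : Int) - 1) = -1 := by
          rw [if_pos ⟨by omega, hs1⟩]; omega
        rw [hk] at hSi
        rw [if_neg (fun h => absurd h.1 (by omega))] at hSi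
        have hstA : stA cs i = ((bestT cs i).1, (bestT cs i).2.1, (bestT cs i).2.2,
            [cntP cs i - cntP cs 0]) := by
          unfold stA; rw [hE]; rfl
        rw [hstA]
        show (if cs[i] = '(' ∨ cs[i] = '[' then
            ((bestT cs i).1, (bestT cs i).2.1, (bestT cs i).2.2,
              pvNot (i : Int) :: [cntP cs i - cntP cs 0])
          else if ([] : List Int) ≠ [] ∨ cntP cs i - cntP cs 0 < 0 then
            (match (if cntP cs i - cntP cs 0 ≥ 0 then
                (cntP cs i - cntP cs 0, pvNot (([] : List Int).headD 0), ([] : List Int).tail)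
              else ((0 : Int), pvNot (cntP cs i - cntP cs 0), ([] : List Int))) with
             | (n, j, stk2) =>
               if PySem.List.pyGet? cs j = some (if cs[i] = ')' then '(' else '[') then
                 match solveMerge (n + (if cs[i] = ']' then (1 : Int) else 0)) stk2 with
                 | (n2, stk3) =>
                   if n2 > (bestT cs i).1 then
                     (n2, (if stk3 ≠ [] then pvNot (stk3.headD 0) + 1 else 0), (i : Int), n2 :: stk3)
                   else ((bestT cs i).1, (bestT cs i).2.1, (bestT cs i).2.2, n2 :: stk3)
               else ((bestT cs i).1, (bestT cs i).2.1, (bestT cs i).2.2, [pvNot (i : Int)]))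
          else ((bestT cs i).1, (bestT cs i).2.1, (bestT cs i).2.2, [pvNot (i : Int)]))
          = stA cs (i+1)
        rw [if_neg hopneg, if_neg (show ¬ (([] : List Int) ≠ [] ∨ cntP cs i - cntP cs 0 < 0) by
          exact fun h => h.elim (fun h1 => h1 rfl) (by omega))]
        exact (stA_reset cs i hSi hncl).symm
      · -- a barrier sits below the count
        obtain ⟨p, hpdef⟩ : ∃ p, stn = p + 1 := ⟨stn - 1, by omega⟩
        have hpm : S cs p < 0 := by
          rcases S_max cs (i-1) hs1 with h | h
          · omega
          · rw [hstn, hpdef] at h; simpa using h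
        have hplen : p < cs.length := by omega
        have hgdp : cs.getD p ' ' = cs[p] := List.getD_eq_getElem cs ' ' hplen
        have hEst : ∃ rest, E cs stn = pvNot (p : Int) :: rest ∧
            ((cs.getD p ' ' = '(' ∨ cs.getD p ' ' = '[') → rest = E cs p) := by
          by_cases hop2 : cs.getD p ' ' = '(' ∨ cs.getD p ' ' = '['
          · exact ⟨E cs p, by rw [hpdef]; exact E_succ_neg_opener cs p hpm hop2, fun _ => rfl⟩
          · exact ⟨[], by rw [hpdef]; exact E_succ_neg_closer cs p hpm hop2, fun h => absurd h hop2⟩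
        obtain ⟨rest, hEst1, hEst2⟩ := hEst
        have hk : (if 1 ≤ i ∧ 0 ≤ S cs (i-1) then S cs (i-1) - 1 else (i : Int) - 1) = (p : Int) := by
          rw [if_pos ⟨by omega, hs1⟩, hSst]; push_cast [hpdef]; ring
        rw [hk] at hSi
        have hstA : stA cs i = ((bestT cs i).1, (bestT cs i).2.1, (bestT cs i).2.2,
            (cntP cs i - cntP cs stn) :: pvNot (p : Int) :: rest) := by
          unfold stA; rw [hE, hEst1]
        rw [hstA]
        show (if cs[i] = '(' ∨ cs[i] = '[' then
            ((bestT cs i).1, (bestT cs i).2.1, (bestT cs i).2.2,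
              pvNot (i : Int) :: (cntP cs i - cntP cs stn) :: pvNot (p : Int) :: rest)
          else if (pvNot (p : Int) :: rest) ≠ [] ∨ cntP cs i - cntP cs stn < 0 then
            (match (if cntP cs i - cntP cs stn ≥ 0 then
                (cntP cs i - cntP cs stn, pvNot ((pvNot (p : Int) :: rest).headD 0),
                  (pvNot (p : Int) :: rest).tail)
              else ((0 : Int), pvNot (cntP cs i - cntP cs stn), pvNot (p : Int) :: rest)) with
             | (n, j, stk2) =>
               if PySem.List.pyGet? cs j = some (if cs[i] = ')' then '(' else '[') then
                 match solveMerge (n + (if cs[i] = ']' then (1 : Int) else 0)) stk2 with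
                 | (n2, stk3) =>
                   if n2 > (bestT cs i).1 then
                     (n2, (if stk3 ≠ [] then pvNot (stk3.headD 0) + 1 else 0), (i : Int), n2 :: stk3)
                   else ((bestT cs i).1, (bestT cs i).2.1, (bestT cs i).2.2, n2 :: stk3)
               else ((bestT cs i).1, (bestT cs i).2.1, (bestT cs i).2.2, [pvNot (i : Int)]))
          else ((bestT cs i).1, (bestT cs i).2.1, (bestT cs i).2.2, [pvNot (i : Int)]))
          = stA cs (i+1)
        rw [if_neg hopneg, if_pos (Or.inl (List.cons_ne_nil _ _)), if_pos hcnt0]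
        show (if PySem.List.pyGet? cs (pvNot ((pvNot (p : Int) :: rest).headD 0))
              = some (if cs[i] = ')' then '(' else '[') then
            match solveMerge ((cntP cs i - cntP cs stn) + (if cs[i] = ']' then (1 : Int) else 0))
                ((pvNot (p : Int) :: rest).tail) with
            | (n2, stk3) =>
              if n2 > (bestT cs i).1 then
                (n2, (if stk3 ≠ [] then pvNot (stk3.headD 0) + 1 else 0), (i : Int), n2 :: stk3)
              else ((bestT cs i).1, (bestT cs i).2.1, (bestT cs i).2.2, n2 :: stk3)
          else ((bestT cs i).1, (bestT cs i).2.1, (bestT cs i).2.2, [pvNot (i : Int)]))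
          = stA cs (i+1)
        simp only [List.headD_cons, List.tail_cons, pvNot_pvNot]
        by_cases hm : cs[p] = (if cs[i] = ')' then '(' else '[')
        · have hcond : PySem.List.pyGet? cs ((p : Nat) : Int)
              = some (if cs[i] = ')' then '(' else '[') := by
            rw [PySem.List.pyGet?_natCast, List.getElem?_eq_getElem hplen, hm]
          rw [if_pos hcond, hEst2 (by rw [hgdp, hm]; split <;> [exact Or.inl rfl; exact Or.inr rfl])]
          have hSq : S cs i = ((if 1 ≤ p ∧ 0 ≤ S cs (p-1) then (S cs (p-1)).toNat else p : Nat) : Int) := by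
            rw [hSi, if_pos ⟨by omega, by rw [show ((p:Int)).toNat = p by omega, hgdp]; exact hm⟩]
            by_cases h1 : 1 ≤ p ∧ 0 ≤ S cs (p-1)
            · have he : ((p : Int) - 1).toNat = p - 1 := by omega
              rw [he, if_pos (by exact ⟨by omega, h1.2⟩), if_pos h1]
              omega
            · have he2 : ¬ (1 ≤ (p : Int) ∧ 0 ≤ S cs (((p : Int) - 1).toNat)) := by
                intro hcontra
                have hp1 : 1 ≤ p := by omega
                have he : ((p : Int) - 1).toNat = p - 1 := by omega
                rw [he] at hcontra
                exact h1 ⟨hp1, hcontra.2⟩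
              rw [if_neg he2, if_neg h1]
          exact stepA_match cs i hi p _ _ (by omega)
            (by rw [hpdef]) (by rw [hm]; exact hro_ne) rfl hSq
        · have hcond : ¬ (PySem.List.pyGet? cs ((p : Nat) : Int)
              = some (if cs[i] = ')' then '(' else '[')) := by
            rw [PySem.List.pyGet?_natCast, List.getElem?_eq_getElem hplen]
            intro h
            exact hm (Option.some_injective _ h)
          rw [if_neg hcond]
          have hSneg : S cs i = -1 := by
            rw [hSi, if_neg]
            intro hcontra
            rw [show ((p:Int)).toNat = p by omega, hgdp] at hcontra
            exact hm hcontra.2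
          exact (stA_reset cs i hSneg hncl).symm
    · -- top of A's stack is a barrier at position i-1
      have hpm : S cs (i-1) < 0 := by omega
      have hplen : i - 1 < cs.length := by omega
      have hgdp : cs.getD (i-1) ' ' = cs[i-1] := List.getD_eq_getElem cs ' ' hplen
      have hEst : ∃ rest, E cs i = pvNot ((i-1 : Nat) : Int) :: rest ∧
          ((cs.getD (i-1) ' ' = '(' ∨ cs.getD (i-1) ' ' = '[') → rest = E cs (i-1)) := by
        have e1 : (i-1)+1 = i := by omega
        by_cases hop2 : cs.getD (i-1) ' ' = '(' ∨ cs.getD (i-1) ' ' = '['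
        · exact ⟨E cs (i-1), by rw [← e1]; exact E_succ_neg_opener cs (i-1) hpm hop2, fun _ => rfl⟩
        · exact ⟨[], by rw [← e1]; exact E_succ_neg_closer cs (i-1) hpm hop2, fun h => absurd h hop2⟩
      obtain ⟨rest, hEst1, hEst2⟩ := hEst
      have hk : (if 1 ≤ i ∧ 0 ≤ S cs (i-1) then S cs (i-1) - 1 else (i : Int) - 1)
          = ((i-1 : Nat) : Int) := by
        rw [if_neg (fun h => hs1 h.2)]; omega
      rw [hk] at hSi
      have hstA : stA cs i = ((bestT cs i).1, (bestT cs i).2.1, (bestT cs i).2.2,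
          pvNot ((i-1 : Nat) : Int) :: rest) := by
        unfold stA; rw [hEst1]
      rw [hstA]
      show (if cs[i] = '(' ∨ cs[i] = '[' then
          ((bestT cs i).1, (bestT cs i).2.1, (bestT cs i).2.2,
            pvNot (i : Int) :: pvNot ((i-1 : Nat) : Int) :: rest)
        else if rest ≠ [] ∨ pvNot ((i-1 : Nat) : Int) < 0 then
          (match (if pvNot ((i-1 : Nat) : Int) ≥ 0 then
              (pvNot ((i-1 : Nat) : Int), pvNot (rest.headD 0), rest.tail)
            else ((0 : Int), pvNot (pvNot ((i-1 : Nat) : Int)), rest)) with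
           | (n, j, stk2) =>
             if PySem.List.pyGet? cs j = some (if cs[i] = ')' then '(' else '[') then
               match solveMerge (n + (if cs[i] = ']' then (1 : Int) else 0)) stk2 with
               | (n2, stk3) =>
                 if n2 > (bestT cs i).1 then
                   (n2, (if stk3 ≠ [] then pvNot (stk3.headD 0) + 1 else 0), (i : Int), n2 :: stk3)
                 else ((bestT cs i).1, (bestT cs i).2.1, (bestT cs i).2.2, n2 :: stk3)
             else ((bestT cs i).1, (bestT cs i).2.1, (bestT cs i).2.2, [pvNot (i : Int)]))
        else ((bestT cs i).1, (bestT cs i).2.1, (bestT cs i).2.2, [pvNot (i : Int)]))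
        = stA cs (i+1)
      rw [if_neg hopneg, if_pos (Or.inr (show pvNot ((i-1 : Nat) : Int) < 0 by unfold pvNot; omega)),
        if_neg (show ¬ (pvNot ((i-1 : Nat) : Int) ≥ 0) by unfold pvNot; omega)]
      show (if PySem.List.pyGet? cs (pvNot (pvNot ((i-1 : Nat) : Int)))
            = some (if cs[i] = ')' then '(' else '[') then
          match solveMerge ((0 : Int) + (if cs[i] = ']' then (1 : Int) else 0)) rest with
          | (n2, stk3) =>
            if n2 > (bestT cs i).1 then
              (n2, (if stk3 ≠ [] then pvNot (stk3.headD 0) + 1 else 0), (i : Int), n2 :: stk3)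
            else ((bestT cs i).1, (bestT cs i).2.1, (bestT cs i).2.2, n2 :: stk3)
        else ((bestT cs i).1, (bestT cs i).2.1, (bestT cs i).2.2, [pvNot (i : Int)]))
        = stA cs (i+1)
      simp only [pvNot_pvNot]
      by_cases hm : cs[i-1] = (if cs[i] = ')' then '(' else '[')
      · have hcond : PySem.List.pyGet? cs ((i-1 : Nat) : Int)
            = some (if cs[i] = ')' then '(' else '[') := by
          rw [PySem.List.pyGet?_natCast, List.getElem?_eq_getElem hplen, hm]
        rw [if_pos hcond, hEst2 (by rw [hgdp, hm]; split <;> [exact Or.inl rfl; exact Or.inr rfl])]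
        have hSq : S cs i = ((if 1 ≤ i-1 ∧ 0 ≤ S cs (i-1-1) then (S cs (i-1-1)).toNat else i-1 : Nat) : Int) := by
          rw [hSi, if_pos ⟨by omega, by rw [show (((i-1:Nat):Int)).toNat = i-1 by omega, hgdp]; exact hm⟩]
          by_cases h1 : 1 ≤ i-1 ∧ 0 ≤ S cs (i-1-1)
          · have he : (((i-1:Nat) : Int) - 1).toNat = i-1-1 := by omega
            rw [he, if_pos (by exact ⟨by omega, h1.2⟩), if_pos h1]
            omega
          · have he2 : ¬ (1 ≤ ((i-1:Nat) : Int) ∧ 0 ≤ S cs ((((i-1:Nat) : Int) - 1).toNat)) := by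
              intro hcontra
              have hp1 : 1 ≤ i-1 := by omega
              have he : (((i-1:Nat) : Int) - 1).toNat = i-1-1 := by omega
              rw [he] at hcontra
              exact h1 ⟨hp1, hcontra.2⟩
            rw [if_neg he2, if_neg h1]
        exact stepA_match cs i hi (i-1) _ _ (by omega)
          (by rw [show (i-1)+1 = i by omega]; ring) (by rw [hm]; exact hro_ne) rfl hSq
      · have hcond : ¬ (PySem.List.pyGet? cs ((i-1 : Nat) : Int)
            = some (if cs[i] = ')' then '(' else '[')) := by
          rw [PySem.List.pyGet?_natCast, List.getElem?_eq_getElem hplen]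
          intro h
          exact hm (Option.some_injective _ h)
        rw [if_neg hcond]
        have hSneg : S cs i = -1 := by
          rw [hSi, if_neg]
          intro hcontra
          rw [show (((i-1:Nat):Int)).toNat = i-1 by omega, hgdp] at hcontra
          exact hm hcontra.2
        exact (stA_reset cs i hSneg hncl).symm

-- A's opener case: push a barrier
lemma stepA_open (cs : List Char) (i : Nat) (hi : i < cs.length)
    (hop : cs[i] = '(' ∨ cs[i] = '[') :
    solveStep cs (stA cs i) ((i : Int), cs[i]) = stA cs (i+1) := by
  have hgetc : cs.getD i ' ' = cs[i] := List.getD_eq_getElem cs ' ' hi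
  have hSneg : S cs i = -1 := S_neg_of_not_closer cs i
    (by rw [hgetc]; rcases hop with h | h <;> rw [h] <;> decide)
  have hbest : bestT cs (i+1) = bestT cs i := by
    rw [bestT_succ]; unfold bestStep; rw [if_neg (by omega)]
  have hE : E cs (i+1) = pvNot (i : Int) :: E cs i :=
    E_succ_neg_opener cs i (by omega) (by rw [hgetc]; exact hop)
  have hstA : stA cs i = ((bestT cs i).1, (bestT cs i).2.1, (bestT cs i).2.2, E cs i) := rfl
  rw [hstA]
  show (if cs[i] = '(' ∨ cs[i] = '[' then
      ((bestT cs i).1, (bestT cs i).2.1, (bestT cs i).2.2, pvNot (i : Int) :: E cs i)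
    else match E cs i with
      | [] => ((bestT cs i).1, (bestT cs i).2.1, (bestT cs i).2.2, [pvNot (i : Int)])
      | j0 :: stk1 =>
        if stk1 ≠ [] ∨ j0 < 0 then
          match (if j0 ≥ 0 then (j0, pvNot (stk1.headD 0), stk1.tail)
              else ((0 : Int), pvNot j0, stk1)) with
          | (n, j, stk2) =>
            if PySem.List.pyGet? cs j = some (if cs[i] = ')' then '(' else '[') then
              match solveMerge (n + (if cs[i] = ']' then (1 : Int) else 0)) stk2 with
              | (n2, stk3) =>
                if n2 > (bestT cs i).1 then
                  (n2, (if stk3 ≠ [] then pvNot (stk3.headD 0) + 1 else 0), (i : Int), n2 :: stk3)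
                else ((bestT cs i).1, (bestT cs i).2.1, (bestT cs i).2.2, n2 :: stk3)
            else ((bestT cs i).1, (bestT cs i).2.1, (bestT cs i).2.2, [pvNot (i : Int)])
        else ((bestT cs i).1, (bestT cs i).2.1, (bestT cs i).2.2, [pvNot (i : Int)]))
    = stA cs (i+1)
  rw [if_pos hop]
  unfold stA
  rw [hbest, hE]

-- A's non-bracket case: under Pre_ the prefix is fully matched, so the stack is [] or one count
lemma stepA_foreign (cs : List Char) (i : Nat) (hi : i < cs.length)
    (hnop : ¬ (cs[i] = '(' ∨ cs[i] = '[')) (hncl2 : ¬ (cs[i] = ')' ∨ cs[i] = ']'))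
    (hcl : cstate cs i = some []) :
    solveStep cs (stA cs i) ((i : Int), cs[i]) = stA cs (i+1) := by
  have hgetc : cs.getD i ' ' = cs[i] := List.getD_eq_getElem cs ' ' hi
  have hSneg : S cs i = -1 := S_neg_of_not_closer cs i (by rw [hgetc]; exact hncl2)
  have hncl : ¬ (cs.getD i ' ' = '(' ∨ cs.getD i ' ' = '[') := by rw [hgetc]; exact hnop
  rcases cstate_facts cs i [] hcl with hi0 | ⟨hi1, hS0⟩
  · subst hi0
    have hstA : stA cs 0 = ((bestT cs 0).1, (bestT cs 0).2.1, (bestT cs 0).2.2, ([] : List Int)) := rfl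
    rw [hstA]
    show (if cs[0] = '(' ∨ cs[0] = '[' then
        ((bestT cs 0).1, (bestT cs 0).2.1, (bestT cs 0).2.2, pvNot ((0:Nat) : Int) :: ([] : List Int))
      else ((bestT cs 0).1, (bestT cs 0).2.1, (bestT cs 0).2.2, [pvNot ((0:Nat) : Int)])) = stA cs 1
    rw [if_neg hnop]
    exact (stA_reset cs 0 hSneg hncl).symm
  · have hE : E cs i = [cntP cs i - cntP cs 0] := by
      have e1 : (i-1)+1 = i := by omega
      calc E cs i = E cs ((i-1)+1) := by rw [e1]
      _ = (cntP cs ((i-1)+1) - cntP cs (S cs (i-1)).toNat) :: E cs (S cs (i-1)).toNat :=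
          E_succ_pos cs (i-1) (by omega)
      _ = [cntP cs i - cntP cs 0] := by rw [e1, hS0]; rfl
    have hcnt : 0 ≤ cntP cs i - cntP cs 0 := by
      have := cntP_mono cs (show 0 ≤ i by omega); omega
    have hstA : stA cs i = ((bestT cs i).1, (bestT cs i).2.1, (bestT cs i).2.2,
        [cntP cs i - cntP cs 0]) := by
      unfold stA; rw [hE]
    rw [hstA]
    show (if cs[i] = '(' ∨ cs[i] = '[' then
        ((bestT cs i).1, (bestT cs i).2.1, (bestT cs i).2.2,
          pvNot (i : Int) :: [cntP cs i - cntP cs 0])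
      else if ([] : List Int) ≠ [] ∨ cntP cs i - cntP cs 0 < 0 then
        (match (if cntP cs i - cntP cs 0 ≥ 0 then
            (cntP cs i - cntP cs 0, pvNot (([] : List Int).headD 0), ([] : List Int).tail)
          else ((0 : Int), pvNot (cntP cs i - cntP cs 0), ([] : List Int))) with
         | (n, j, stk2) =>
           if PySem.List.pyGet? cs j = some (if cs[i] = ')' then '(' else '[') then
             match solveMerge (n + (if cs[i] = ']' then (1 : Int) else 0)) stk2 with
             | (n2, stk3) =>
               if n2 > (bestT cs i).1 then
                 (n2, (if stk3 ≠ [] then pvNot (stk3.headD 0) + 1 else 0), (i : Int), n2 :: stk3)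
               else ((bestT cs i).1, (bestT cs i).2.1, (bestT cs i).2.2, n2 :: stk3)
           else ((bestT cs i).1, (bestT cs i).2.1, (bestT cs i).2.2, [pvNot (i : Int)]))
      else ((bestT cs i).1, (bestT cs i).2.1, (bestT cs i).2.2, [pvNot (i : Int)]))
      = stA cs (i+1)
    rw [if_neg hnop, if_neg (show ¬ (([] : List Int) ≠ [] ∨ cntP cs i - cntP cs 0 < 0) by
      exact fun h => h.elim (fun h1 => h1 rfl) (by omega))]
    exact (stA_reset cs i hSneg hncl).symm

lemma stepA_eq (cs : List Char)
    (i : Nat) (hi : i < cs.length)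
    (hpre : ¬ (cs.getD i ' ' = '(' ∨ cs.getD i ' ' = ')' ∨ cs.getD i ' ' = '[' ∨ cs.getD i ' ' = ']') →
      cstate cs i = some []) :
    solveStep cs (stA cs i) ((i : Int), cs[i]) = stA cs (i+1) := by
  have hgetc : cs.getD i ' ' = cs[i] := List.getD_eq_getElem cs ' ' hi
  by_cases h1 : cs[i] = '(' ∨ cs[i] = '['
  · exact stepA_open cs i hi h1
  · by_cases h2 : cs[i] = ')' ∨ cs[i] = ']'
    · exact stepA_closer cs i hi h2
    · exact stepA_foreign cs i hi h1 h2 (hpre (by rw [hgetc]; tauto))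

lemma startL_getD (cs : List Char) (i j : Nat) (hj : j < cs.length) :
    (startL cs i).getD j 0 = if j < i then S cs j else -1 := by
  unfold startL
  rw [List.getD_eq_getElem _ _ (by simpa using hj)]
  simp

lemma prefL_getD (cs : List Char) (i j : Nat) (hj : j < cs.length + 1) :
    (prefL cs i).getD j 0 = if j ≤ i then cntP cs j else 0 := by
  unfold prefL
  rw [List.getD_eq_getElem _ _ (by simpa using hj)]
  simp

lemma startL_set (cs : List Char) (i : Nat) (hi : i < cs.length) :
    (startL cs i).set i (S cs i) = startL cs (i+1) := by
  unfold startL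
  apply List.ext_getElem
  · simp
  · intro j h1 h2
    have hj : j < cs.length := by simpa using h2
    by_cases hji : j = i
    · subst hji
      rw [List.getElem_set_self (by simpa using hj)]
      simp
    · rw [List.getElem_set_ne (by omega) ..]
      simp only [List.getElem_map, List.getElem_range]
      by_cases hlt : j < i
      · rw [if_pos hlt, if_pos (by omega)]
      · rw [if_neg hlt, if_neg (by omega)]

lemma startL_nowrite (cs : List Char) (i : Nat) (h : S cs i = -1) :
    startL cs (i+1) = startL cs i := by
  unfold startL
  apply List.ext_getElem
  · simp
  · intro j h1 h2
    simp only [List.getElem_map, List.getElem_range]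
    by_cases hji : j = i
    · subst hji; rw [if_pos (by omega)]
      by_cases hlt : j < j
      · omega
      · rw [if_neg hlt, h]
    · by_cases hlt : j < i
      · rw [if_pos (by omega), if_pos hlt]
      · rw [if_neg (by omega), if_neg hlt]

lemma prefL_set (cs : List Char) (i : Nat) (_hi : i < cs.length) :
    (prefL cs i).set (i+1) (cntP cs (i+1)) = prefL cs (i+1) := by
  unfold prefL
  apply List.ext_getElem
  · simp
  · intro j h1 h2
    have hj : j < cs.length + 1 := by simpa using h2
    by_cases hji : j = i + 1
    · subst hji
      rw [List.getElem_set_self (by simpa using hj)]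
      simp
    · rw [List.getElem_set_ne (by omega) ..]
      simp only [List.getElem_map, List.getElem_range]
      by_cases hlt : j ≤ i
      · rw [if_pos hlt, if_pos (by omega)]
      · rw [if_neg hlt, if_neg (by omega)]

lemma stepB_eq (cs : List Char) (i : Nat) (hi : i < cs.length) :
    solveAltStep cs (stB cs i) ((i : Int), cs[i]) = stB cs (i+1) := by
  have hpref1 : PySem.List.pySetD (prefL cs i) ((i : Int) + 1)
      (PySem.List.pyGetD (prefL cs i) (i : Int) 0 + (if cs[i] = ']' then (1 : Int) else 0))
      = prefL cs (i+1) := by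
    have hcast : ((i : Int) + 1) = ((i + 1 : Nat) : Int) := by push_cast; ring
    rw [hcast, PySem.List.pySetD_natCast, PySem.List.pyGetD_natCast]
    rw [prefL_getD cs i i (by omega), if_pos (le_refl i)]
    rw [← cntP_succ cs i hi]
    exact prefL_set cs i hi
  show (let pref1 := PySem.List.pySetD (prefL cs i) ((i : Int) + 1)
          (PySem.List.pyGetD (prefL cs i) (i : Int) 0 + (if cs[i] = ']' then (1 : Int) else 0));
    if cs[i] = ')' ∨ cs[i] = ']' then
      let k := if 1 ≤ (i : Int) ∧ 0 ≤ PySem.List.pyGetD (startL cs i) ((i : Int) - 1) 0 then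
          PySem.List.pyGetD (startL cs i) ((i : Int) - 1) 0 - 1 else (i : Int) - 1
      if 0 ≤ k ∧ PySem.List.pyGet? cs k = some (if cs[i] = ')' then '(' else '[') then
        let st := if 1 ≤ k ∧ 0 ≤ PySem.List.pyGetD (startL cs i) (k - 1) 0 then
            PySem.List.pyGetD (startL cs i) (k - 1) 0 else k
        let start1 := PySem.List.pySetD (startL cs i) (i : Int) st
        let v := PySem.List.pyGetD pref1 ((i : Int) + 1) 0 - PySem.List.pyGetD pref1 st 0
        if v > (bestT cs i).1 then (start1, pref1, v, st, (i : Int))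
        else (start1, pref1, (bestT cs i).1, (bestT cs i).2.1, (bestT cs i).2.2)
      else (startL cs i, pref1, (bestT cs i).1, (bestT cs i).2.1, (bestT cs i).2.2)
    else (startL cs i, pref1, (bestT cs i).1, (bestT cs i).2.1, (bestT cs i).2.2))
    = stB cs (i+1)
  simp only [hpref1]
  have hgetc : cs.getD i ' ' = cs[i] := List.getD_eq_getElem cs ' ' hi
  have hbsucc := bestT_succ cs i
  by_cases hcl : cs[i] = ')' ∨ cs[i] = ']'
  case neg =>
    rw [if_neg hcl]
    have hSneg : S cs i = -1 := S_neg_of_not_closer cs i (by rw [hgetc]; exact hcl)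
    have hbest : bestT cs (i+1) = bestT cs i := by
      rw [hbsucc]; unfold bestStep; rw [if_neg (by omega)]
    unfold stB
    rw [startL_nowrite cs i hSneg, hbest]
  rw [if_pos hcl]
  -- the B-computed k equals the k of the S recurrence
  have hk_eq : (if 1 ≤ (i : Int) ∧ 0 ≤ PySem.List.pyGetD (startL cs i) ((i : Int) - 1) 0 then
        PySem.List.pyGetD (startL cs i) ((i : Int) - 1) 0 - 1 else (i : Int) - 1)
      = (if 1 ≤ i ∧ 0 ≤ S cs (i-1) then S cs (i-1) - 1 else (i : Int) - 1) := by
    by_cases hi1 : 1 ≤ i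
    · have hcast : ((i : Int) - 1) = ((i - 1 : Nat) : Int) := by omega
      have hread : PySem.List.pyGetD (startL cs i) ((i : Int) - 1) 0 = S cs (i-1) := by
        rw [hcast, PySem.List.pyGetD_natCast, startL_getD cs i (i-1) (by omega)]
        rw [if_pos (show i-1 < i by omega)]
      rw [hread]
      by_cases hs : 0 ≤ S cs (i-1)
      · rw [if_pos ⟨by omega, hs⟩, if_pos ⟨hi1, hs⟩]
      · rw [if_neg (fun h => hs h.2), if_neg (fun h => hs h.2)]
    · rw [if_neg (fun h => hi1 (by exact_mod_cast h.1)), if_neg (fun h => hi1 h.1)]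
  rw [hk_eq]
  set k : Int := if 1 ≤ i ∧ 0 ≤ S cs (i-1) then S cs (i-1) - 1 else (i : Int) - 1 with hkdef
  have hkle : k ≤ (i : Int) - 1 := by
    rw [hkdef]; split
    · have := S_le cs (i-1); omega
    · omega
  have hSi := S_eq cs i
  rw [hgetc] at hSi
  simp only [if_pos hcl] at hSi
  rw [← hkdef] at hSi
  by_cases hm : 0 ≤ k ∧ PySem.List.pyGet? cs k = some (if cs[i] = ')' then '(' else '[')
  case neg =>
    rw [if_neg hm]
    have hSneg : S cs i = -1 := by
      rw [hSi, if_neg]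
      intro ⟨hk0, hmt⟩
      apply hm
      refine ⟨hk0, ?_⟩
      have hcast : k = ((k.toNat : Nat) : Int) := by omega
      rw [hcast, PySem.List.pyGet?_natCast, List.getElem?_eq_getElem (show k.toNat < cs.length by omega)]
      rw [← hmt, List.getD_eq_getElem cs ' ' (show k.toNat < cs.length by omega)]
    have hbest : bestT cs (i+1) = bestT cs i := by
      rw [hbsucc]; unfold bestStep; rw [if_neg (by omega)]
    unfold stB
    rw [startL_nowrite cs i hSneg, hbest]
  rw [if_pos hm]
  obtain ⟨hk0, hmt⟩ := hm
  have hktn : k.toNat < cs.length := by omega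
  have hmt' : cs.getD k.toNat ' ' = (if cs[i] = ')' then '(' else '[') := by
    rw [List.getD_eq_getElem cs ' ' hktn]
    have h' := hmt
    rw [show k = ((k.toNat : Nat) : Int) by omega, PySem.List.pyGet?_natCast,
      List.getElem?_eq_getElem hktn] at h'
    exact Option.some_injective _ h'
  rw [if_pos ⟨hk0, hmt'⟩] at hSi
  -- the B-computed st equals S cs i
  have hst_eq : (if 1 ≤ k ∧ 0 ≤ PySem.List.pyGetD (startL cs i) (k - 1) 0 then
        PySem.List.pyGetD (startL cs i) (k - 1) 0 else k) = S cs i := by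
    rw [hSi]
    by_cases hk1 : 1 ≤ k
    · have hcast : (k - 1) = (((k-1).toNat : Nat) : Int) := by omega
      have hread : PySem.List.pyGetD (startL cs i) (k - 1) 0 = S cs ((k-1).toNat) := by
        conv_lhs => rw [hcast]
        rw [PySem.List.pyGetD_natCast, startL_getD cs i ((k-1).toNat) (by omega)]
        rw [if_pos (show (k-1).toNat < i by omega)]
      rw [hread]
    · rw [if_neg (fun h => hk1 h.1), if_neg (fun h => hk1 h.1)]
  rw [hst_eq]
  have hSpos : 0 ≤ S cs i := by
    rw [hSi]; split
    · rename_i h; exact h.2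
    · exact hk0
  have hSile : S cs i ≤ k := by
    rw [hSi]; split
    · have := S_le cs ((k-1).toNat); omega
    · omega
  have hwrite : PySem.List.pySetD (startL cs i) (i : Int) (S cs i) = startL cs (i+1) := by
    rw [PySem.List.pySetD_natCast]
    exact startL_set cs i hi
  rw [hwrite]
  have hv1 : PySem.List.pyGetD (prefL cs (i+1)) ((i : Int) + 1) 0 = cntP cs (i+1) := by
    have hcast : ((i : Int) + 1) = ((i + 1 : Nat) : Int) := by push_cast; ring
    rw [hcast, PySem.List.pyGetD_natCast, prefL_getD cs (i+1) (i+1) (by omega), if_pos (le_refl _)]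
  have hv2 : PySem.List.pyGetD (prefL cs (i+1)) (S cs i) 0 = cntP cs ((S cs i).toNat) := by
    have hcast : S cs i = (((S cs i).toNat : Nat) : Int) := by omega
    conv_lhs => rw [hcast]
    rw [PySem.List.pyGetD_natCast, prefL_getD cs (i+1) ((S cs i).toNat) (by omega),
      if_pos (by omega)]
  rw [hv1, hv2]
  have hbest : bestT cs (i+1) = (if cntP cs (i+1) - cntP cs ((S cs i).toNat) > (bestT cs i).1 then
      (cntP cs (i+1) - cntP cs ((S cs i).toNat), S cs i, (i : Int)) else bestT cs i) := by
    rw [hbsucc]; unfold bestStep; rw [if_pos hSpos]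
  unfold stB
  rw [hbest]
  by_cases hgt : cntP cs (i+1) - cntP cs ((S cs i).toNat) > (bestT cs i).1
  · rw [if_pos hgt, if_pos hgt]
  · rw [if_neg hgt, if_neg hgt]

lemma foldl_range_iter {σ : Type} (g : σ → Nat → σ) (St : Nat → σ) (n : Nat)
    (h : ∀ i, i < n → g (St i) i = St (i+1)) :
    (List.range n).foldl g (St 0) = St n := by
  induction n with
  | zero => simp
  | succ m ih =>
    rw [List.range_succ, List.foldl_append]
    have hm : (List.range m).foldl g (St 0) = St m := by
      apply ih; intro i hi; exact h i (by omega)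
    rw [hm]
    simpa using h m (by omega)

-- ===== VERDICT (by name: the statement is the Claim_ definition above) =====
lemma fold_enum {σ : Type} (cs : List Char) (g : σ → Int × Char → σ) (a : σ) :
    (PySem.List.enumerate cs 0).foldl g a
      = (List.range cs.length).foldl (fun acc (j : Nat) => g acc ((j : Int), cs.getD j ' ')) a := by
  have h1 : PySem.List.enumerate cs 0 = PySem.List.enumerate cs := rfl
  rw [h1, PySem.List.enumerate_eq_map_pyRange cs ' ']
  have h2 : PySem.List.len cs = ((cs.length : Nat) : Int) := by
    simp [PySem.List.len]
  rw [h2, PySem.List.pyRange_zero_natCast, List.map_map, List.foldl_map]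
  congr 1
  funext acc j
  simp

lemma foldA (cs : List Char)
    (hpre : ∀ i, i < cs.length →
      ¬ (cs.getD i ' ' = '(' ∨ cs.getD i ' ' = ')' ∨ cs.getD i ' ' = '[' ∨ cs.getD i ' ' = ']') →
      cstate cs i = some []) :
    (PySem.List.enumerate cs 0).foldl (solveStep cs) ((0 : Int), (0 : Int), (0 : Int), ([] : List Int))
      = stA cs cs.length := by
  rw [fold_enum]
  have h0 : stA cs 0 = ((0 : Int), (0 : Int), (0 : Int), ([] : List Int)) := rfl
  rw [← h0]
  apply foldl_range_iter
  intro i hi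
  have hg : cs.getD i ' ' = cs[i] := List.getD_eq_getElem cs ' ' hi
  rw [hg]
  exact stepA_eq cs i hi (hpre i hi)

lemma foldB (cs : List Char) :
    (PySem.List.enumerate cs 0).foldl (solveAltStep cs)
        (List.replicate cs.length (-1 : Int), List.replicate (cs.length + 1) (0 : Int),
          (0 : Int), (0 : Int), (0 : Int))
      = stB cs cs.length := by
  rw [fold_enum]
  have h0 : stB cs 0 = (List.replicate cs.length (-1 : Int),
      List.replicate (cs.length + 1) (0 : Int), (0 : Int), (0 : Int), (0 : Int)) := by
    unfold stB startL prefL bestT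
    refine congrArg₂ _ ?_ (congrArg₂ _ ?_ rfl)
    · apply List.ext_getElem
      · simp
      · intro j h1 h2
        simp
    · apply List.ext_getElem
      · simp
      · intro j h1 h2
        simp only [List.getElem_map, List.getElem_range, List.getElem_replicate]
        have : j < cs.length + 1 := by simpa using h2
        by_cases hj : j = 0
        · subst hj; simp [cntP]
        · rw [if_neg (by omega)]
  rw [← h0]
  apply foldl_range_iter
  intro i hi
  have hg : cs.getD i ' ' = cs[i] := List.getD_eq_getElem cs ' ' hi
  rw [hg]
  exact stepB_eq cs i hi

theorem solve_spec : Claim_equal_solve := by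
  unfold Claim_equal_solve Spec_solve Pre_solve
  intro s _ hPre
  have hP : ∀ i, i < s.toList.length →
      ¬ (s.toList.getD i ' ' = '(' ∨ s.toList.getD i ' ' = ')' ∨
        s.toList.getD i ' ' = '[' ∨ s.toList.getD i ' ' = ']') →
      cstate s.toList i = some [] := by
    intro i hi hfor
    have h1 := List.all_eq_true.mp hPre i (List.mem_range.mpr hi)
    simp only [Bool.or_eq_true, beq_iff_eq] at h1
    tauto
  have hA : solve s = ((bestT s.toList s.toList.length).1,
      if (bestT s.toList s.toList.length).1 ≠ 0 then
        String.mk (PySem.List.slice s.toList (some (bestT s.toList s.toList.length).2.1)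
          (some ((bestT s.toList s.toList.length).2.2 + 1)))
      else "") := by
    show (match (PySem.List.enumerate s.toList 0).foldl (solveStep s.toList)
        ((0 : Int), (0 : Int), (0 : Int), ([] : List Int)) with
      | (max_n, max_l, max_r, _) =>
        (max_n, if max_n ≠ 0 then
          String.mk (PySem.List.slice s.toList (some max_l) (some (max_r + 1))) else "")) = _
    rw [foldA s.toList hP]
    rfl
  have hB : solve_alt s = (if (bestT s.toList s.toList.length).1 ≠ 0 then
      ((bestT s.toList s.toList.length).1,
        String.mk (PySem.List.slice s.toList (some (bestT s.toList s.toList.length).2.1)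
          (some ((bestT s.toList s.toList.length).2.2 + 1))))
    else ((0 : Int), "")) := by
    show (match (PySem.List.enumerate s.toList 0).foldl (solveAltStep s.toList)
        (List.replicate s.toList.length (-1 : Int),
          List.replicate (s.toList.length + 1) (0 : Int), (0 : Int), (0 : Int), (0 : Int)) with
      | (_, _, best, bl, br) =>
        if best ≠ 0 then
          (best, String.mk (PySem.List.slice s.toList (some bl) (some (br + 1))))
        else ((0 : Int), "")) = _
    rw [foldB s.toList]
    rfl
  rw [hA, hB]
  by_cases hb : (bestT s.toList s.toList.length).1 = 0
  · rw [if_neg (by omega), if_neg (by omega), hb]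
  · rw [if_pos hb, if_pos hb]
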